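-- pv_equiv track=rewrite | github.com/demisto/content | Packs/BmcHelixRemedyForce/Integrations/BmcHelixRemedyForce/BMCHelixRemedyforce.py | prepare_user_details_get_output
-- ===== SOURCE A (Python) =====
-- from typing import Dict, Callable, Any, List, Tuple, Union, Optional
--
-- def prepare_user_details_get_output(users_records: List[Dict[str, Any]]) -> List[Dict[str, Any]]:
--     """
--     Prepares context output for user_details_get command.
--
--     :param users_records: List containing dictionaries of user records.
--     :return: prepared context output list.
--     """
--     return [{'Id': record.get('Id', ''),
--              'Name': record.get('Name', ''),
--              'FirstName': record.get('FirstName', ''),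
--              'LastName': record.get('LastName', ''),
--              'Username': record.get('Username', ''),
--              'Email': record.get('Email', ''),
--              'Phone': record.get('Phone', ''),
--              'Account': record.get('BMCServiceDesk__Account_Name__c', ''),
--              'CompanyName': record.get('CompanyName', ''),
--              'Division': record.get('Division', ''),
--              'Department': record.get('Department', ''),
--              'Title': record.get('Title', ''),
--              'IsStaff': record.get('BMCServiceDesk__IsStaffUser__c', ''),
--              } for record in users_records]
-- ===== SOURCE B (Python) =====
-- SRC_TO_OUT = {
--     'Id': 'Id',
--     'Name': 'Name',
--     'FirstName': 'FirstName',
--     'LastName': 'LastName',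
--     'Username': 'Username',
--     'Email': 'Email',
--     'Phone': 'Phone',
--     'BMCServiceDesk__Account_Name__c': 'Account',
--     'CompanyName': 'CompanyName',
--     'Division': 'Division',
--     'Department': 'Department',
--     'Title': 'Title',
--     'BMCServiceDesk__IsStaffUser__c': 'IsStaff',
-- }
--
-- OUT_KEYS = ['Id', 'Name', 'FirstName', 'LastName', 'Username', 'Email', 'Phone',
--             'Account', 'CompanyName', 'Division', 'Department', 'Title', 'IsStaff']
--
--
-- def prepare_user_details_get_output(users_records):
--     """Single scan of each record: rename/keep the recognised keys, then emit
--     the fixed output schema with '' for anything the scan did not find."""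
--     results = []
--     for record in users_records:
--         found = {}
--         for key, value in record.items():
--             if key in SRC_TO_OUT:
--                 found[SRC_TO_OUT[key]] = value
--         results.append({out: found.get(out, '') for out in OUT_KEYS})
--     return results
-- ===== Notes on version B (the rewrite author's own statement) =====
-- stated objective: alternative
-- what changed: Inverts the traversal: instead of 13 independent record.get lookups per record, B scans each record's items once, renaming/keeping recognised keys into a 'found' dict, and then emits the fixed output schema from 'found'; Pre_ only excludes Lean-side association lists with duplicate keys, which represent no Python dict.
import Mathlib
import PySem

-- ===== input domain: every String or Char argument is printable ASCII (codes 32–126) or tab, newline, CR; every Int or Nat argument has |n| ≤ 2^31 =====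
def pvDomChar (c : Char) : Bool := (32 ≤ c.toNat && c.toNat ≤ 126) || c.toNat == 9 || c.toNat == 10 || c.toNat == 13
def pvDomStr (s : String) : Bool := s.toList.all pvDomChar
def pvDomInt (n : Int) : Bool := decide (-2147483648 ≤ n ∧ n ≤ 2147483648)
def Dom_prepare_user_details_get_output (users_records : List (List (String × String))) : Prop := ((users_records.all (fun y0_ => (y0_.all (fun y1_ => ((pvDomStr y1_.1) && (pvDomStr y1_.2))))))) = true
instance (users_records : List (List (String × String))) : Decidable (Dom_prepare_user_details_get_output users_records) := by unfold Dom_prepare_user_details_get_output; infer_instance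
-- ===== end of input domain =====

-- B inverts the traversal: one scan of each record collecting recognised (renamed) keys into a dict, then the fixed schema is emitted from it; return-value equivalence on records with distinct keys (alternative decomposition, same cost).


-- ===== PORT A =====
def prepare_user_details_get_output (users_records : List (List (String × String))) : List (List (String × String)) :=
  users_records.map (fun record =>
    [("Id", PySem.Dict.getD (PySem.Dict.mk record) "Id" ""),
     ("Name", PySem.Dict.getD (PySem.Dict.mk record) "Name" ""),
     ("FirstName", PySem.Dict.getD (PySem.Dict.mk record) "FirstName" ""),
     ("LastName", PySem.Dict.getD (PySem.Dict.mk record) "LastName" ""),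
     ("Username", PySem.Dict.getD (PySem.Dict.mk record) "Username" ""),
     ("Email", PySem.Dict.getD (PySem.Dict.mk record) "Email" ""),
     ("Phone", PySem.Dict.getD (PySem.Dict.mk record) "Phone" ""),
     ("Account", PySem.Dict.getD (PySem.Dict.mk record) "BMCServiceDesk__Account_Name__c" ""),
     ("CompanyName", PySem.Dict.getD (PySem.Dict.mk record) "CompanyName" ""),
     ("Division", PySem.Dict.getD (PySem.Dict.mk record) "Division" ""),
     ("Department", PySem.Dict.getD (PySem.Dict.mk record) "Department" ""),
     ("Title", PySem.Dict.getD (PySem.Dict.mk record) "Title" ""),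
     ("IsStaff", PySem.Dict.getD (PySem.Dict.mk record) "BMCServiceDesk__IsStaffUser__c" "")])

-- ===== PORT B =====
-- B: one scan of each record's items, renaming recognised source keys into `found`,
-- then the fixed output schema is emitted from `found`.
def SRC_TO_OUT : PySem.Dict String String := PySem.Dict.mk
  [("Id", "Id"), ("Name", "Name"), ("FirstName", "FirstName"), ("LastName", "LastName"),
   ("Username", "Username"), ("Email", "Email"), ("Phone", "Phone"),
   ("BMCServiceDesk__Account_Name__c", "Account"), ("CompanyName", "CompanyName"),
   ("Division", "Division"), ("Department", "Department"), ("Title", "Title"),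
   ("BMCServiceDesk__IsStaffUser__c", "IsStaff")]

def OUT_KEYS : List String :=
  ["Id", "Name", "FirstName", "LastName", "Username", "Email", "Phone",
   "Account", "CompanyName", "Division", "Department", "Title", "IsStaff"]

-- the body of B's inner `for key, value in record.items(): if key in SRC_TO_OUT: found[SRC_TO_OUT[key]] = value`
def stepB (found : PySem.Dict String String) (p : String × String) : PySem.Dict String String :=
  if SRC_TO_OUT.contains p.1 then found.insert (SRC_TO_OUT.getD p.1 "") p.2 else found

def prepare_user_details_get_output_alt (users_records : List (List (String × String))) : List (List (String × String)) :=
  users_records.foldl (fun results record =>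
    results ++ [OUT_KEYS.map (fun out => (out, (record.foldl stepB PySem.Dict.empty).getD out ""))]) []

-- ===== PRECONDITION & SPEC =====
-- Pre_ excludes association lists in which a record has duplicate keys: such a list represents no
-- Python dict (Python collapses the duplicates before the function is called), and A's first-match
-- lookup vs B's overwriting scan are both defensible accidental readings of it.
def Pre_prepare_user_details_get_output (users_records : List (List (String × String))) : Prop :=
  ∀ record ∈ users_records, (record.map Prod.fst).Nodup
instance (users_records : List (List (String × String))) : Decidable (Pre_prepare_user_details_get_output users_records) := by unfold Pre_prepare_user_details_get_output; infer_instance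
def pvWitness_prepare_user_details_get_output : (List (List (String × String))) :=
  [[("Id", "u1"), ("Email", "a@b.c"), ("BMCServiceDesk__IsStaffUser__c", "true"), ("Foo", "bar")], []]

def Spec_prepare_user_details_get_output (users_records : List (List (String × String))) (out : List (List (String × String))) : Prop := out = prepare_user_details_get_output_alt users_records
instance (users_records : List (List (String × String))) (out : List (List (String × String))) : Decidable (Spec_prepare_user_details_get_output users_records out) := by unfold Spec_prepare_user_details_get_output; infer_instance

-- ===== CLAIM (what is proved, stated in full; the proofs are below) =====
def Claim_equal_prepare_user_details_get_output : Prop := ∀ (users_records : List (List (String × String))), Dom_prepare_user_details_get_output users_records → Pre_prepare_user_details_get_output users_records → Spec_prepare_user_details_get_output users_records (prepare_user_details_get_output users_records)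

-- ===== LEMMAS AND PROOFS =====

-- the explicit result-appending loop of B is a map
theorem foldl_append_singleton_eq_map {α β : Type} (g : α → β) :
    ∀ (l : List α) (acc : List β), l.foldl (fun a x => a ++ [g x]) acc = acc ++ l.map g := by
  intro l
  induction l with
  | nil => intro acc; simp
  | cons x l ih => intro acc; simp [List.foldl_cons, ih]

-- any key SRC_TO_OUT contains is one of the 13 literal source keys
theorem contains_SRC_TO_OUT {x : String} (h : SRC_TO_OUT.contains x = true) :
    x ∈ (["Id", "Name", "FirstName", "LastName", "Username", "Email", "Phone",
          "BMCServiceDesk__Account_Name__c", "CompanyName", "Division", "Department", "Title",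
          "BMCServiceDesk__IsStaffUser__c"] : List String) := by
  simp [SRC_TO_OUT, PySem.Dict.contains_mk, List.any] at h
  simp [List.mem_cons]
  tauto

-- lift a checkable statement over the 13 source keys to all contained keys
theorem hinj_SRC_TO_OUT (o s : String)
    (h : ∀ x ∈ (["Id", "Name", "FirstName", "LastName", "Username", "Email", "Phone",
          "BMCServiceDesk__Account_Name__c", "CompanyName", "Division", "Department", "Title",
          "BMCServiceDesk__IsStaffUser__c"] : List String), SRC_TO_OUT.getD x "" = o → x = s) :
    ∀ x, SRC_TO_OUT.contains x = true → SRC_TO_OUT.getD x "" = o → x = s := by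
  intro x hx
  exact h x (contains_SRC_TO_OUT hx)

-- a step on a pair whose key is not s never touches output key o
theorem getD_stepB_of_ne (o s : String)
    (hinj : ∀ x, SRC_TO_OUT.contains x = true → SRC_TO_OUT.getD x "" = o → x = s)
    (p : String × String) (hp : p.1 ≠ s) (f : PySem.Dict String String) :
    (stepB f p).getD o "" = f.getD o "" := by
  unfold stepB
  split_ifs with hc
  · refine PySem.Dict.getD_insert_of_ne f _ _ ?_
    intro he
    exact hp (hinj p.1 hc he.symm)
  · rfl

theorem getD_foldl_absent (o s : String)
    (hinj : ∀ x, SRC_TO_OUT.contains x = true → SRC_TO_OUT.getD x "" = o → x = s) :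
    ∀ (l : List (String × String)) (f : PySem.Dict String String), (∀ p ∈ l, p.1 ≠ s) →
      (l.foldl stepB f).getD o "" = f.getD o "" := by
  intro l
  induction l with
  | nil => intro f _; rfl
  | cons p l ih =>
    intro f h
    rw [List.foldl_cons, ih _ (fun q hq => h q (List.mem_cons_of_mem _ hq)),
        getD_stepB_of_ne o s hinj p (h p List.mem_cons_self) f]

theorem getD_foldl_main (o s : String)
    (hc : SRC_TO_OUT.contains s = true) (ho : SRC_TO_OUT.getD s "" = o)
    (hinj : ∀ x, SRC_TO_OUT.contains x = true → SRC_TO_OUT.getD x "" = o → x = s) :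
    ∀ (l : List (String × String)) (f : PySem.Dict String String), (l.map Prod.fst).Nodup →
      (l.foldl stepB f).getD o "" =
        (match l.find? (fun p => p.1 == s) with
         | some p => p.2
         | none => f.getD o "") := by
  intro l
  induction l with
  | nil => intro f _; rfl
  | cons p l ih =>
    intro f hnd
    rw [List.map_cons, List.nodup_cons] at hnd
    by_cases hps : p.1 = s
    · rw [List.foldl_cons, List.find?_cons_of_pos (by simp [hps])]
      have habs : ∀ q ∈ l, q.1 ≠ s := by
        intro q hq he
        apply hnd.1
        rw [hps, ← he]
        exact List.mem_map_of_mem hq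
      rw [getD_foldl_absent o s hinj l _ habs]
      unfold stepB
      rw [hps, if_pos hc, ho]
      exact PySem.Dict.getD_insert_self _ _ _ _
    · rw [List.foldl_cons, List.find?_cons_of_neg (by simp [hps]), ih _ hnd.2]
      cases l.find? (fun q => q.1 == s) with
      | some q => rfl
      | none => exact getD_stepB_of_ne o s hinj p hps f

-- per output key: what B's scan found equals A's direct lookup
theorem pair_eq (o s : String)
    (hc : SRC_TO_OUT.contains s = true) (ho : SRC_TO_OUT.getD s "" = o)
    (hinj : ∀ x, SRC_TO_OUT.contains x = true → SRC_TO_OUT.getD x "" = o → x = s)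
    (record : List (String × String)) (hnd : (record.map Prod.fst).Nodup) :
    (record.foldl stepB PySem.Dict.empty).getD o "" = PySem.Dict.getD (PySem.Dict.mk record) s "" := by
  rw [getD_foldl_main o s hc ho hinj record _ hnd]
  show _ = ((PySem.Dict.mk record).get? s).getD ""
  show _ = ((record.find? (fun p => p.1 == s)).map (fun x => x.2)).getD ""
  cases record.find? (fun p => p.1 == s) with
  | some q => rfl
  | none => rfl

-- ===== VERDICT (by name: the statement is the Claim_ definition above) =====
theorem prepare_user_details_get_output_spec : Claim_equal_prepare_user_details_get_output := by
  intro users_records _ hpre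
  unfold Spec_prepare_user_details_get_output
  unfold prepare_user_details_get_output prepare_user_details_get_output_alt
  rw [foldl_append_singleton_eq_map, List.nil_append]
  apply List.map_congr_left
  intro record hr
  have hnd := hpre record hr
  unfold OUT_KEYS
  simp only [List.map_cons, List.map_nil, List.cons.injEq, Prod.mk.injEq]
  exact ⟨⟨trivial, (pair_eq "Id" "Id" (by decide) (by decide) (hinj_SRC_TO_OUT _ _ (by decide)) record hnd).symm⟩,
    ⟨trivial, (pair_eq "Name" "Name" (by decide) (by decide) (hinj_SRC_TO_OUT _ _ (by decide)) record hnd).symm⟩,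
    ⟨trivial, (pair_eq "FirstName" "FirstName" (by decide) (by decide) (hinj_SRC_TO_OUT _ _ (by decide)) record hnd).symm⟩,
    ⟨trivial, (pair_eq "LastName" "LastName" (by decide) (by decide) (hinj_SRC_TO_OUT _ _ (by decide)) record hnd).symm⟩,
    ⟨trivial, (pair_eq "Username" "Username" (by decide) (by decide) (hinj_SRC_TO_OUT _ _ (by decide)) record hnd).symm⟩,
    ⟨trivial, (pair_eq "Email" "Email" (by decide) (by decide) (hinj_SRC_TO_OUT _ _ (by decide)) record hnd).symm⟩,
    ⟨trivial, (pair_eq "Phone" "Phone" (by decide) (by decide) (hinj_SRC_TO_OUT _ _ (by decide)) record hnd).symm⟩,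
    ⟨trivial, (pair_eq "Account" "BMCServiceDesk__Account_Name__c" (by decide) (by decide) (hinj_SRC_TO_OUT _ _ (by decide)) record hnd).symm⟩,
    ⟨trivial, (pair_eq "CompanyName" "CompanyName" (by decide) (by decide) (hinj_SRC_TO_OUT _ _ (by decide)) record hnd).symm⟩,
    ⟨trivial, (pair_eq "Division" "Division" (by decide) (by decide) (hinj_SRC_TO_OUT _ _ (by decide)) record hnd).symm⟩,
    ⟨trivial, (pair_eq "Department" "Department" (by decide) (by decide) (hinj_SRC_TO_OUT _ _ (by decide)) record hnd).symm⟩,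
    ⟨trivial, (pair_eq "Title" "Title" (by decide) (by decide) (hinj_SRC_TO_OUT _ _ (by decide)) record hnd).symm⟩,
    ⟨trivial, (pair_eq "IsStaff" "BMCServiceDesk__IsStaffUser__c" (by decide) (by decide) (hinj_SRC_TO_OUT _ _ (by decide)) record hnd).symm⟩, trivial⟩
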